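-- pv_equiv track=rewrite | github.com/Vasichar11/Exercises | exercise1/detect_duplicates.py | detect_duplicates_sorted
-- ===== SOURCE A (Python) =====
-- def detect_duplicates_sorted(input_list=None):
--     # Time complexity O(n), where n is the number of elements in the list
--     duplicates = []
--     previous_item = None
--
--     for item in input_list:
--         if item == previous_item:
--             if not duplicates or duplicates[-1] != item:  # Ensure list is not empty and check if this duplicate has been examined
--                 duplicates.append(item)
--         previous_item = item
--
--     return duplicates
-- ===== SOURCE B (Python) =====
-- def detect_duplicates_sorted(input_list=None):
--     counts = {}
--     for item in input_list:
--         counts[item] = counts.get(item, 0) + 1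
--     return [value for value, count in counts.items() if count > 1]
-- ===== Notes on version B (the rewrite author's own statement) =====
-- stated objective: alternative
-- what changed: Replaces the previous-item/last-emitted adjacent-comparison scan with a frequency dictionary: count every value once, then list the values whose count exceeds one; Pre_ restricts to lists whose equal elements are contiguous (every sorted list, the function's stated domain), because on inputs with separated duplicates A's adjacent scan misses them, an artefact of its implementation.
-- outside the precondition, e.g. on detect_duplicates_sorted([1, 2, 1]): A returns [], B returns [1]; on detect_duplicates_sorted([2, 2, 1, 1, 2, 2]): A returns [2, 1, 2], B returns [2, 1]
import Mathlib
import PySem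

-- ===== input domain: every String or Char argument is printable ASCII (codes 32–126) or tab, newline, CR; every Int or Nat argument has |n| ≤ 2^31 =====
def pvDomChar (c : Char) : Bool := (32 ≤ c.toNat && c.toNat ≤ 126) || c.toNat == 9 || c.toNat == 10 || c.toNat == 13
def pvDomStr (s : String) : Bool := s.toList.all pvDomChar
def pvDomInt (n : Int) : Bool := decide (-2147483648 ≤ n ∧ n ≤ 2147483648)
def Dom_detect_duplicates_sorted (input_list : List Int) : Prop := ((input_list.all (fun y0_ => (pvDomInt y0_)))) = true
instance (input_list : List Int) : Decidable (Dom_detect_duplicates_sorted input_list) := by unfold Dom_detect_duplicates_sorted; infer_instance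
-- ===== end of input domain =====

-- B replaces A's previous-item/last-emitted adjacent-comparison scan with a frequency
-- dictionary (count each value, keep those counted more than once): a different algorithm,
-- proved equal on lists whose equal elements are contiguous (every sorted list).


-- ===== PORT A =====
-- A's loop: state (duplicates, previous_item); `duplicates[-1]` is getLast?.
def pvALoop : List Int → Option Int → List Int → List Int
  | [], _, dups => dups
  | item :: rest, prev, dups =>
    let dups' :=
      if some item == prev then
        (if dups.isEmpty || dups.getLast? != some item then dups ++ [item] else dups)
      else dups
    pvALoop rest (some item) dups'

def detect_duplicates_sorted (input_list : List Int) : List Int :=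
  pvALoop input_list none []

-- ===== PORT B =====
-- B: one counting pass into a dict, then the values whose count exceeds one.
def detect_duplicates_sorted_alt (input_list : List Int) : List Int :=
  let counts := input_list.foldl (fun d x => d.insert x (d.getD x 0 + 1))
    (PySem.Dict.empty : PySem.Dict Int Int)
  (counts.items.filter (fun p => 1 < p.2)).map Prod.fst

-- ===== PRECONDITION & SPEC =====
-- Pre_ admits exactly the lists whose equal elements are contiguous (collapsing adjacent repeats
-- leaves no duplicate value) — every sorted list, the function's stated domain; it excludes lists
-- with separated duplicates, where A's adjacent-comparison output (missing a duplicate, or emitting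
-- a value twice) is an accident of its implementation.
def Pre_detect_duplicates_sorted (input_list : List Int) : Prop :=
  (input_list.destutter (· ≠ ·)).Nodup
instance (input_list : List Int) : Decidable (Pre_detect_duplicates_sorted input_list) := by
  unfold Pre_detect_duplicates_sorted; infer_instance

def pvWitness_detect_duplicates_sorted : List Int := [1, 1, 2, 3, 3]

def Spec_detect_duplicates_sorted (input_list : List Int) (out : List Int) : Prop := out = detect_duplicates_sorted_alt input_list
instance (input_list : List Int) (out : List Int) : Decidable (Spec_detect_duplicates_sorted input_list out) := by unfold Spec_detect_duplicates_sorted; infer_instance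

-- ===== CLAIM (what is proved, stated in full; the proofs are below) =====
def Claim_equal_detect_duplicates_sorted : Prop := ∀ (input_list : List Int), Dom_detect_duplicates_sorted input_list → Pre_detect_duplicates_sorted input_list → Spec_detect_duplicates_sorted input_list (detect_duplicates_sorted input_list)

-- ===== LEMMAS AND PROOFS =====

-- Emission core of A: state = (previous item, last emitted duplicate).
def pvG : List Int → Option Int → Option Int → List Int
  | [], _, _ => []
  | x :: xs, prev, last =>
    if some x == prev then
      (if last ≠ some x then x :: pvG xs (some x) (some x) else pvG xs (some x) last)
    else pvG xs (some x) last

-- State-based destutter: drop an element equal to the previous one.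
def pvDest : Option Int → List Int → List Int
  | _, [] => []
  | last, k :: ks => if some k ≠ last then k :: pvDest (some k) ks else pvDest (some k) ks

-- runs of equal adjacent elements, as (key, length)
def pvRunsAux (k : Int) (c : Nat) : List Int → List (Int × Nat)
  | [] => [(k, c)]
  | x :: xs => if x == k then pvRunsAux k (c + 1) xs else (k, c) :: pvRunsAux x 1 xs

def pvRuns : List Int → List (Int × Nat)
  | [] => []
  | x :: xs => pvRunsAux x 1 xs

-- keys of runs longer than one
def pvKr (rs : List (Int × Nat)) : List Int := (rs.filter (fun p => 1 < p.2)).map Prod.fst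

theorem pvALoop_eq_g (xs : List Int) : ∀ (prev : Option Int) (dups : List Int),
    pvALoop xs prev dups = dups ++ pvG xs prev dups.getLast? := by
  induction xs with
  | nil => intro prev dups; simp [pvALoop, pvG]
  | cons x xs ih =>
    intro prev dups
    by_cases hp : some x == prev
    · by_cases hl : dups.getLast? = some x
      · have hne : dups.isEmpty = false := by
          cases dups with
          | nil => simp at hl
          | cons a as => simp [List.isEmpty]
        simp [pvALoop, pvG, hp, hl, hne, ih]
      · have : (dups.isEmpty || dups.getLast? != some x) = true := by
          simp [bne_iff_ne]; exact Or.inr hl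
        simp [pvALoop, pvG, hp, hl, this, ih, List.getLast?_append]
    · simp [pvALoop, pvG, hp, ih]

theorem pvRunsAux_decomp (xs : List Int) : ∀ (k : Int) (c : Nat),
    pvRunsAux k c xs = (k, c + (xs.takeWhile (fun y => y == k)).length)
      :: pvRuns (xs.dropWhile (fun y => y == k)) := by
  induction xs with
  | nil => intro k c; simp [pvRunsAux, pvRuns]
  | cons x xs ih =>
    intro k c
    by_cases hx : x == k
    · have hx' : (x == k) = true := hx
      rw [show pvRunsAux k c (x :: xs) = pvRunsAux k (c + 1) xs from by simp [pvRunsAux, hx'],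
        ih]
      simp [hx']
      omega
    · have hx' : (x == k) = false := by simpa using hx
      simp [pvRunsAux, hx', pvRuns]

theorem pvG_eq_dest (xs : List Int) : ∀ (k : Int) (c : Nat) (last : Option Int),
    1 ≤ c → (2 ≤ c → last = some k) →
    pvG xs (some k) last = pvDest last (pvKr (pvRunsAux k c xs)) := by
  induction xs with
  | nil =>
    intro k c last _ h2
    by_cases hc : 2 ≤ c
    · simp [pvG, pvRunsAux, pvKr, pvDest, h2 hc, Nat.lt_of_lt_of_le Nat.one_lt_two hc]
    · have : ¬ 1 < c := by omega
      simp [pvG, pvRunsAux, pvKr, pvDest, this]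
  | cons x xs ih =>
    intro k c last h1 h2
    by_cases hx : x = k
    · subst hx
      have hrw : pvRunsAux x c (x :: xs) = pvRunsAux x (c + 1) xs := by
        simp [pvRunsAux]
      have hd := pvRunsAux_decomp xs x (c + 1)
      have hcnt : 1 < c + 1 + (xs.takeWhile (fun y => y == x)).length := by omega
      by_cases hl : last = some x
      · have ihx := ih x (c + 1) (some x) (by omega) (fun _ => rfl)
        simp only [pvG, beq_self_eq_true, if_true, hl, ne_eq, not_true_eq_false, if_false]
        rw [ihx, hrw]
      · have ihx := ih x (c + 1) (some x) (by omega) (fun _ => rfl)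
        have hkr : pvKr (pvRunsAux x (c + 1) xs)
            = x :: pvKr (pvRuns (xs.dropWhile (fun y => y == x))) := by
          rw [hd]; simp [pvKr, hcnt]
        simp only [pvG, beq_self_eq_true, if_true, ne_eq, hl, not_false_eq_true, if_true]
        rw [hrw, hkr, ihx, hkr]
        simp [pvDest, Ne.symm hl]
    · have hx' : (x == k) = false := by simpa using hx
      have hg : pvG (x :: xs) (some k) last = pvG xs (some x) last := by
        simp [pvG, hx']
      have hra : pvRunsAux k c (x :: xs) = (k, c) :: pvRunsAux x 1 xs := by
        simp [pvRunsAux, hx']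
      rw [hg, hra]
      by_cases hc : 1 < c
      · have hlast := h2 hc
        subst hlast
        have : pvKr ((k, c) :: pvRunsAux x 1 xs) = k :: pvKr (pvRunsAux x 1 xs) := by
          simp [pvKr, hc]
        rw [this]
        simp only [pvDest, ne_eq, not_true_eq_false, if_false]
        exact ih x 1 (some k) (le_refl 1) (by omega)
      · have : pvKr ((k, c) :: pvRunsAux x 1 xs) = pvKr (pvRunsAux x 1 xs) := by
          simp [pvKr, hc]
        rw [this, ih x 1 last (le_refl 1) (by omega)]

-- Pre_'s destutter is exactly the list of run keys.
theorem pv_destutter'_eq (xs : List Int) : ∀ (k : Int) (c : Nat),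
    List.destutter' (· ≠ ·) k xs = (pvRunsAux k c xs).map Prod.fst := by
  induction xs with
  | nil => intro k c; simp [List.destutter'_nil, pvRunsAux]
  | cons x xs ih =>
    intro k c
    by_cases h : x = k
    · subst h
      have : ¬ (x ≠ x) := by simp
      simp only [List.destutter'_cons, if_neg this, pvRunsAux, beq_self_eq_true, if_true]
      exact ih x (c + 1)
    · have hne : k ≠ x := Ne.symm h
      have hb : (x == k) = false := by simpa using h
      simp only [List.destutter'_cons, if_pos hne, pvRunsAux, hb, Bool.false_eq_true,
        if_false, List.map_cons]
      exact congrArg _ (ih x 1)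

theorem pv_destutter_eq (l : List Int) :
    l.destutter (· ≠ ·) = (pvRuns l).map Prod.fst := by
  cases l with
  | nil => simp [List.destutter, pvRuns]
  | cons x xs => simpa [List.destutter, pvRuns] using pv_destutter'_eq xs x 1

theorem pv_mem_keys_runsAux (xs : List Int) : ∀ (k y : Int) (c : Nat),
    y ∈ (pvRunsAux k c xs).map Prod.fst ↔ y = k ∨ y ∈ xs := by
  induction xs with
  | nil => intro k y c; simp [pvRunsAux]
  | cons x xs ih =>
    intro k y c
    by_cases h : x = k
    · subst h
      simp only [pvRunsAux, beq_self_eq_true, if_true, ih, List.mem_cons]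
      tauto
    · have hb : (x == k) = false := by simpa using h
      simp only [pvRunsAux, hb, Bool.false_eq_true, if_false, List.map_cons, List.mem_cons,
        ih, List.mem_cons]

theorem pv_mem_keys (l : List Int) (y : Int) (h : y ∈ l) : y ∈ (pvRuns l).map Prod.fst := by
  cases l with
  | nil => simp at h
  | cons x xs =>
    rcases List.mem_cons.mp h with h | h
    · exact (pv_mem_keys_runsAux xs x y 1).mpr (Or.inl h)
    · exact (pv_mem_keys_runsAux xs x y 1).mpr (Or.inr h)

-- Set.ofList peels a leading block of equal elements whose value does not recur.
theorem pv_foldl_add_stay (t : List Int) (x : Int) :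
    ∀ (s : List Int), (∀ y ∈ t, y = x) → x ∈ s →
      t.foldl PySem.Set.add s = s := by
  induction t with
  | nil => intro s _ _; rfl
  | cons y t ih =>
    intro s ht hx
    have hy : y = x := ht y (List.mem_cons_self)
    subst hy
    have hc : PySem.Set.add s y = s := by
      simp [PySem.Set.add, PySem.Set.contains, hx]
    rw [List.foldl_cons, hc]
    exact ih s (fun z hz => ht z (List.mem_cons_of_mem _ hz)) hx

theorem pv_foldl_add_cons (r : List Int) (x : Int) (hx : x ∉ r) :
    ∀ (s : List Int), r.foldl PySem.Set.add (x :: s) = x :: r.foldl PySem.Set.add s := by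
  induction r with
  | nil => intro s; rfl
  | cons y r ih =>
    intro s
    have hyx : y ≠ x := fun h => hx (h ▸ List.mem_cons_self)
    have hxr : x ∉ r := fun h => hx (List.mem_cons_of_mem _ h)
    have hc' : PySem.Set.contains (x :: s) y = PySem.Set.contains s y := by
      simp [PySem.Set.contains, hyx]
    have hstep : PySem.Set.add (x :: s) y = x :: PySem.Set.add s y := by
      simp only [PySem.Set.add, hc']
      split_ifs <;> simp
    rw [List.foldl_cons, List.foldl_cons, hstep]
    exact ih hxr (PySem.Set.add s y)

theorem pv_ofList_block (x : Int) (t r : List Int) (ht : ∀ y ∈ t, y = x) (hr : x ∉ r) :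
    PySem.Set.ofList (x :: (t ++ r)) = x :: PySem.Set.ofList r := by
  rw [PySem.Set.ofList_eq_foldl, PySem.Set.ofList_eq_foldl]
  have h0 : PySem.Set.add [] x = [x] := by simp [PySem.Set.add, PySem.Set.contains]
  rw [List.foldl_cons, h0, List.foldl_append, pv_foldl_add_stay t x [x] ht (by simp)]
  exact pv_foldl_add_cons r x hr []

-- The heart: on a grouped list, keys of long runs = distinct values of count > 1.
theorem pv_main : ∀ (n : Nat) (l : List Int), l.length ≤ n →
    ((pvRuns l).map Prod.fst).Nodup →
    pvKr (pvRuns l) = (PySem.Set.ofList l).filter (fun k => decide (1 < l.count k)) := by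
  intro n
  induction n with
  | zero =>
    intro l hl _
    have : l = [] := List.eq_nil_of_length_eq_zero (Nat.le_zero.mp hl)
    subst this; rfl
  | succ n ih =>
    intro l hl hnd
    cases l with
    | nil => rfl
    | cons x xs =>
      set t := xs.takeWhile (fun y => y == x) with htdef
      set r := xs.dropWhile (fun y => y == x) with hrdef
      have hxs : t ++ r = xs := List.takeWhile_append_dropWhile
      have ht : ∀ y ∈ t, y = x := by
        intro y hy
        have := List.mem_takeWhile_imp hy
        simpa using this
      have hruns : pvRuns (x :: xs) = (x, 1 + t.length) :: pvRuns r := by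
        simp only [pvRuns]
        exact pvRunsAux_decomp xs x 1
      have hkeys : ((pvRuns (x :: xs)).map Prod.fst) = x :: (pvRuns r).map Prod.fst := by
        rw [hruns]; rfl
      rw [hkeys] at hnd
      have hxk : x ∉ (pvRuns r).map Prod.fst := (List.nodup_cons.mp hnd).1
      have hndr : ((pvRuns r).map Prod.fst).Nodup := (List.nodup_cons.mp hnd).2
      have hxr : x ∉ r := fun h => hxk (pv_mem_keys r x h)
      have hlen : r.length ≤ n := by
        have h1 : t.length + r.length = xs.length := by
          rw [← List.length_append, hxs]
        have h2 : xs.length ≤ n := by simpa using hl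
        omega
      have ihr := ih r hlen hndr
      -- counts
      have hcx : (x :: xs).count x = 1 + t.length := by
        have hct : t.count x = t.length := List.count_eq_length.mpr (fun y hy => (ht y hy).symm ▸ rfl)
        have hcr : r.count x = 0 := List.count_eq_zero.mpr hxr
        rw [← hxs]
        simp [List.count_append, hct, hcr]
        omega
      have hck : ∀ k ∈ r, (x :: xs).count k = r.count k := by
        intro k hk
        have hkx : k ≠ x := fun h => hxr (h ▸ hk)
        have hctk : t.count k = 0 := List.count_eq_zero.mpr (fun h => hkx (ht k h))
        rw [← hxs]
        simp [List.count_append, hctk, Ne.symm hkx]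
      -- Set.ofList decomposition
      have hofl : PySem.Set.ofList (x :: xs) = x :: PySem.Set.ofList r := by
        rw [← hxs]; exact pv_ofList_block x t r ht hxr
      -- assemble
      have hfr : (PySem.Set.ofList r).filter (fun k => decide (1 < (x :: xs).count k))
          = (PySem.Set.ofList r).filter (fun k => decide (1 < r.count k)) := by
        apply List.filter_congr
        intro k hk
        rw [hck k ((PySem.Set.mem_ofList r k).mp hk)]
      rw [hruns, hofl, List.filter_cons, hfr, ← ihr, hcx]
      by_cases hlong : 1 < 1 + t.length
      · simp [pvKr, hlong]
      · simp [pvKr, hlong]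

theorem pv_dest_nodup : ∀ (ks : List Int), List.Pairwise (· ≠ ·) ks →
    ∀ (last : Option Int), (∀ k ∈ ks, some k ≠ last) → pvDest last ks = ks := by
  intro ks
  induction ks with
  | nil => intro _ _ _; rfl
  | cons k ks ih =>
    intro hpw last hh
    have h1 : some k ≠ last := hh k List.mem_cons_self
    simp only [pvDest, if_pos h1]
    refine congrArg _ (ih (List.pairwise_cons.mp hpw).2 (some k) ?_)
    intro k' hk'
    have : k ≠ k' := (List.pairwise_cons.mp hpw).1 k' hk'
    simpa using Ne.symm this

-- ===== VERDICT (by name: the statement is the Claim_ definition above) =====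
theorem detect_duplicates_sorted_spec : Claim_equal_detect_duplicates_sorted := by
  intro l _ hpre
  unfold Pre_detect_duplicates_sorted at hpre
  rw [pv_destutter_eq] at hpre
  unfold Spec_detect_duplicates_sorted detect_duplicates_sorted detect_duplicates_sorted_alt
  -- A side: pvDest of the long-run keys
  rw [pvALoop_eq_g]
  have hA : pvG l none none = pvDest none (pvKr (pvRuns l)) := by
    cases l with
    | nil => rfl
    | cons x xs =>
      have hg : pvG (x :: xs) none none = pvG xs (some x) none := by
        simp [pvG]
      rw [hg, pvG_eq_dest xs x 1 none (le_refl 1) (by omega)]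
      rfl
  -- pvKr list is Nodup, so pvDest is the identity on it
  have hsub : (pvKr (pvRuns l)).Sublist ((pvRuns l).map Prod.fst) :=
    List.Sublist.map Prod.fst List.filter_sublist
  have hnd : (pvKr (pvRuns l)).Nodup := hpre.sublist hsub
  have hdest : pvDest none (pvKr (pvRuns l)) = pvKr (pvRuns l) :=
    pv_dest_nodup _ hnd none (by intro k _; simp)
  -- B side: counter + items
  simp only [PySem.Dict.foldl_insert_getD_add_one_eq_counter, PySem.Dict.items_counter]
  have hmain := pv_main l.length l (le_refl _) hpre
  simp only [List.getLast?_nil, List.nil_append, hA, hdest]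
  rw [hmain, List.filter_map, List.map_map]
  have hcomp : ((fun p : Int × Int => decide (1 < p.2)) ∘ (fun k => (k, (l.count k : Int))))
      = fun k => decide (1 < l.count k) := by
    funext k
    simp
  rw [hcomp, show (Prod.fst ∘ fun k : Int => (k, (l.count k : Int))) = id from rfl,
    List.map_id]
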